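-- pv_equiv track=rewrite | github.com/S0NGMinHyuk/programmers-file | 외계어 사전.py | solution
-- ===== SOURCE A (Python) =====
-- def solution(spell, dic):
--     spell = set(spell)
--     for d in dic:
--
--         setD = set(d)
--         if spell & setD == spell:
--             lenD = len(d)
--             for i in spell:
--                 d = d.replace(i, "")
--             if len(d) - lenD == -len(spell):
--                 return 1
--
--     return 2
-- ===== SOURCE B (Python) =====
-- def solution(spell, dic):
--     need = set(spell)
--     for d in dic:
--         freq = {}
--         for ch in d:
--             freq[ch] = freq.get(ch, 0) + 1
--         if all(freq.get(s, 0) == 1 for s in need):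
--             return 1
--     return 2
-- ===== Notes on version B (the rewrite author's own statement) =====
-- stated objective: alternative
-- what changed: B builds a character-frequency dict per word once and returns 1 as soon as every distinct spell string has frequency exactly 1, replacing A's set-intersection test plus per-spell-char .replace scans and length arithmetic.
import Mathlib
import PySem

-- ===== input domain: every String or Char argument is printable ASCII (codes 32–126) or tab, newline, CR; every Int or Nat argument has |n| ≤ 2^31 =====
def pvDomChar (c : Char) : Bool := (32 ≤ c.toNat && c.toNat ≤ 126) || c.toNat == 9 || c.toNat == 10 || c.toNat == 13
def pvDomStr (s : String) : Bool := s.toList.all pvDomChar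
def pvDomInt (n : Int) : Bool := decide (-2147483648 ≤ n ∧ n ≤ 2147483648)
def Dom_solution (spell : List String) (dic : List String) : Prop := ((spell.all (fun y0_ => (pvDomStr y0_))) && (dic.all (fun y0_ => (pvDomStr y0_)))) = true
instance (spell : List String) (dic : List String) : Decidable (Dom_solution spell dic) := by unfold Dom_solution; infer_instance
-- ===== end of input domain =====

-- B replaces A's set-intersection test plus per-spell-char .replace scans and length
-- arithmetic by one character-frequency table per word, checked to be exactly 1 on each
-- distinct spell string (alternative decomposition; same observable behaviour).

-- ===== PORT A =====
-- set(d): the set of d's characters as one-character strings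
def pvCharStrs (d : String) : List String := d.toList.map (fun c => String.ofList [c])

-- the 'for d in dic' loop of A, with spell already turned into a set
def solutionLoopA (spellS : PySem.Set String) (dic : List String) : Int :=
  match dic with
  | [] => 2
  | d :: rest =>
    let setD : PySem.Set String := PySem.Set.ofList (pvCharStrs d)
    -- 'spell & setD == spell' (Python set ==)
    if PySem.Set.equal (PySem.Set.inter spellS setD) spellS then
      let lenD : Int := PySem.Str.len d
      -- 'for i in spell: d = d.replace(i, "")' — the set's iteration order cannot
      -- affect the only use of d (its length), so iterating in insertion order is exact
      let d' := spellS.foldl (fun s i => PySem.Str.replace s i "") d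
      if PySem.Str.len d' - lenD = -(PySem.Set.len spellS) then 1
      else solutionLoopA spellS rest
    else solutionLoopA spellS rest

def solution (spell : List String) (dic : List String) : Int :=
  solutionLoopA (PySem.Set.ofList spell) dic

-- ===== PORT B =====
-- the 'for d in dic' loop of B: per word, build the character-frequency dict, then
-- test every distinct spell string for frequency exactly 1
def solutionLoopB (need : PySem.Set String) (dic : List String) : Int :=
  match dic with
  | [] => 2
  | d :: rest =>
    let freq : PySem.Dict String Int :=
      (pvCharStrs d).foldl (fun m ch => m.insert ch (m.getD ch 0 + 1)) PySem.Dict.empty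
    -- 'all(freq.get(s, 0) == 1 for s in need)' — order-independent consumption of the set
    if need.all (fun s => freq.getD s 0 == 1) then 1
    else solutionLoopB need rest

def solution_alt (spell : List String) (dic : List String) : Int :=
  solutionLoopB (PySem.Set.ofList spell) dic

-- ===== PRECONDITION & SPEC =====
def Spec_solution (spell : List String) (dic : List String) (out : Int) : Prop := out = solution_alt spell dic
instance (spell : List String) (dic : List String) (out : Int) : Decidable (Spec_solution spell dic out) := by unfold Spec_solution; infer_instance

-- ===== CLAIM (what is proved, stated in full; the proofs are below) =====
def Claim_equal_solution : Prop := ∀ (spell : List String) (dic : List String), Dom_solution spell dic → Spec_solution spell dic (solution spell dic)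

-- ===== LEMMAS AND PROOFS =====

-- counting a predicate and its negation partitions the list
lemma countP_not_add (l : List Char) (p : Char → Bool) :
    l.countP (fun c => !(p c)) + l.countP p = l.length := by
  induction l with
  | nil => simp
  | cons a t ih => by_cases h : p a <;> simp [h] <;> omega

-- replace.go with a single-character pattern and empty replacement filters that character out
lemma replace_go_singleton (c : Char) (fuel : Nat) (l acc : List Char) (h : l.length ≤ fuel) :
    PySem.Chars.replace.go [c] [] fuel l acc = acc.reverse ++ l.filter (fun x => x ≠ c) := by
  induction fuel generalizing l acc with
  | zero =>
    have : l = [] := List.length_eq_zero_iff.mp (Nat.le_zero.mp h)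
    subst this
    rw [PySem.Chars.replace.go.eq_def]; simp
  | succ n ih =>
    cases l with
    | nil => rw [PySem.Chars.replace.go.eq_def]; simp
    | cons x t =>
      rw [PySem.Chars.replace.go.eq_def]
      simp only [List.isPrefixOf_cons₂, List.isPrefixOf_nil_left, Bool.and_true]
      by_cases hx : c = x
      · subst hx
        rw [if_pos (show (c == c) = true by simp)]
        simp only [List.reverse_nil, List.nil_append]
        rw [show List.drop (List.length [c]) (c :: t) = t from rfl]
        rw [ih t acc (by simpa using Nat.le_of_succ_le_succ h)]
        simp
      · rw [if_neg (by simp [hx])]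
        rw [ih t (x :: acc) (by simpa using Nat.le_of_succ_le_succ h)]
        simp [Ne.symm hx]

-- str.replace(c, "") on a one-character pattern, at the character-list level
lemma toList_replace_singleton (w : String) (c : Char) :
    (PySem.Str.replace w (String.ofList [c]) "").toList = w.toList.filter (fun x => x ≠ c) := by
  rw [PySem.Str.toList_replace]
  simp only [String.toList_ofList]
  rw [show ("" : String).toList = [] from rfl]
  unfold PySem.Chars.replace
  rw [if_neg (by simp)]
  rw [replace_go_singleton c w.toList.length w.toList [] le_rfl]
  simp

-- folding the replaces over a list of single-character strings filters all of them out
lemma foldl_replace_eq_filter (S : List String) (h : ∀ s ∈ S, ∃ c, s = String.ofList [c])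
    (w : String) :
    (S.foldl (fun s i => PySem.Str.replace s i "") w).toList
      = w.toList.filter (fun c => decide (String.ofList [c] ∉ S)) := by
  induction S generalizing w with
  | nil => simp
  | cons s rest ih =>
    obtain ⟨c0, rfl⟩ := h s (List.mem_cons_self ..)
    simp only [List.foldl_cons]
    rw [ih (fun x hx => h x (List.mem_cons_of_mem _ hx)) (PySem.Str.replace w (String.ofList [c0]) "")]
    rw [toList_replace_singleton w c0]
    rw [List.filter_filter]
    apply List.filter_congr
    intro x _
    by_cases hc : x = c0
    · subst hc; simp
    · have : String.ofList [x] ≠ String.ofList [c0] := by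
        intro he
        exact hc (by simpa using congrArg String.toList he)
      simp [hc, this]

-- Σ_{s ∈ S} count of s among d's one-character strings = how many characters of d lie in S
lemma sum_counts (S : List String) (hS : S.Nodup) (cs : List Char) :
    (S.map (fun s => (((cs.map (fun c => String.ofList [c])).count s : Int)))).sum
      = (cs.countP (fun c => decide (String.ofList [c] ∈ S)) : Int) := by
  induction cs with
  | nil => simp
  | cons c cs ih =>
    simp only [List.map_cons, List.countP_cons]
    have hcount : ∀ s : String,
        ((String.ofList [c] :: cs.map (fun c => String.ofList [c])).count s : Int)
          = ((cs.map (fun c => String.ofList [c])).count s : Int)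
            + (if (String.ofList [c] == s) = true then (1 : Int) else 0) := by
      intro s
      rw [List.count_cons]
      split <;> push_cast <;> ring
    calc (S.map (fun s => ((String.ofList [c] :: cs.map (fun c => String.ofList [c])).count s : Int))).sum
        = (S.map (fun s => ((cs.map (fun c => String.ofList [c])).count s : Int)
            + (if (String.ofList [c] == s) = true then (1 : Int) else 0))).sum := by
          apply congrArg; exact List.map_congr_left (fun s _ => hcount s)
      _ = (S.map (fun s => ((cs.map (fun c => String.ofList [c])).count s : Int))).sum
            + (S.map (fun s => if (String.ofList [c] == s) = true then (1 : Int) else 0)).sum := by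
          rw [PySem.List.sum_map_add_int]
      _ = _ := by
          rw [ih, PySem.List.sum_map_ite_one_zero]
          have hcp : S.countP (fun s => String.ofList [c] == s) = S.count (String.ofList [c]) := by
            rw [List.count]
            apply List.countP_congr
            intro s _
            constructor <;> intro hh <;> exact beq_iff_eq.mpr (beq_iff_eq.mp hh).symm
          rw [hcp]
          by_cases hm : String.ofList [c] ∈ S
          · rw [List.count_eq_one_of_mem hS hm]
            simp only [hm, decide_true, if_pos]
            push_cast; ring
          · rw [List.count_eq_zero_of_not_mem hm]
            simp [hm]

-- a list of integers, each ≥ 1, sums to its length iff every entry is 1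
lemma sum_eq_length_iff (l : List Int) (h : ∀ x ∈ l, 1 ≤ x) :
    (l.sum = l.length) ↔ ∀ x ∈ l, x = 1 := by
  induction l with
  | nil => simp
  | cons a t ih =>
    have ha := h a (List.mem_cons_self ..)
    have ht : ∀ x ∈ t, 1 ≤ x := fun x hx => h x (List.mem_cons_of_mem _ hx)
    have hle : (t.length : Int) ≤ t.sum := by
      clear ih h ha
      induction t with
      | nil => simp
      | cons b u ihu =>
        have := ht b (List.mem_cons_self ..)
        have hu := ihu (fun x hx => ht x (List.mem_cons_of_mem _ hx))
        simp only [List.sum_cons, List.length_cons]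
        push_cast
        omega
    simp only [List.sum_cons, List.length_cons, List.mem_cons, forall_eq_or_imp]
    rw [← ih ht]
    push_cast
    constructor
    · intro he; constructor <;> omega
    · intro ⟨h1, h2⟩; omega

-- the per-word condition of A equals the per-word condition of B
lemma cond_eq (S : PySem.Set String) (hS : S.Nodup) (d : String) :
    ((PySem.Set.equal (PySem.Set.inter S (PySem.Set.ofList (pvCharStrs d))) S = true) ∧
      PySem.Str.len (S.foldl (fun s i => PySem.Str.replace s i "") d) - PySem.Str.len d
        = -(PySem.Set.len S))
    ↔ (S.all (fun s =>
        ((pvCharStrs d).foldl (fun m ch => m.insert ch (m.getD ch 0 + 1))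
          PySem.Dict.empty).getD s 0 == (1 : Int)) = true) := by
  simp only [pvCharStrs, List.all_eq_true]
  have hsub : PySem.Set.equal
        (PySem.Set.inter S (PySem.Set.ofList (d.toList.map (fun c => String.ofList [c])))) S = true
      ↔ ∀ s ∈ S, s ∈ d.toList.map (fun c => String.ofList [c]) := by
    rw [PySem.Set.equal_iff]
    constructor
    · intro hh s hs
      have := (hh s).mpr hs
      rw [PySem.Set.mem_inter, PySem.Set.mem_ofList] at this
      exact this.2
    · intro hh s
      rw [PySem.Set.mem_inter, PySem.Set.mem_ofList]
      exact ⟨fun h => h.1, fun h => ⟨h, hh s h⟩⟩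
  -- the length equation, under the knowledge that every spell string is a character of d
  have hkey : ∀ (_ : ∀ s ∈ S, ∃ c, s = String.ofList [c]),
      (PySem.Str.len (S.foldl (fun s i => PySem.Str.replace s i "") d) - PySem.Str.len d
          = -(PySem.Set.len S))
        ↔ (d.toList.countP (fun c => decide (String.ofList [c] ∈ S)) : Int) = (S.length : Int) := by
    intro hsingle
    have hflt := foldl_replace_eq_filter S hsingle d
    have hpart := countP_not_add d.toList (fun c => decide (String.ofList [c] ∈ S))
    have hfl : (d.toList.filter (fun c => decide (String.ofList [c] ∉ S))).length
        = d.toList.countP (fun c => decide (String.ofList [c] ∉ S)) :=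
      (List.countP_eq_length_filter).symm
    simp only [PySem.Str.len, PySem.Set.len, hflt, hfl]
    simp only [decide_not] at *
    constructor
    · intro hlen; push_cast at hlen; omega
    · intro hcp; omega
  constructor
  · rintro ⟨he, hlen⟩
    rw [hsub] at he
    have hsingle : ∀ s ∈ S, ∃ c, s = String.ofList [c] := by
      intro s hs
      obtain ⟨c, _, rfl⟩ := List.mem_map.mp (he s hs)
      exact ⟨c, rfl⟩
    have hcp := (hkey hsingle).mp hlen
    have hsum := sum_counts S hS d.toList
    rw [hcp] at hsum
    have hones : ∀ x ∈ S.map (fun s => (((d.toList.map (fun c => String.ofList [c])).count s : Int))), x = 1 := by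
      apply (sum_eq_length_iff _ ?_).mp
      · rw [hsum]; simp
      · intro x hx
        obtain ⟨s, hs, rfl⟩ := List.mem_map.mp hx
        have : 0 < (d.toList.map (fun c => String.ofList [c])).count s :=
          List.count_pos_iff.mpr (he s hs)
        omega
    intro s hs
    have := hones _ (List.mem_map.mpr ⟨s, hs, rfl⟩)
    simp only [beq_iff_eq, PySem.Dict.getD_foldl_insert_add_one, PySem.Dict.getD_empty]
    omega
  · intro hall
    have hone : ∀ s ∈ S, (d.toList.map (fun c => String.ofList [c])).count s = 1 := by
      intro s hs
      have hh := hall s hs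
      simp only [beq_iff_eq, PySem.Dict.getD_foldl_insert_add_one, PySem.Dict.getD_empty] at hh
      omega
    have he : ∀ s ∈ S, s ∈ d.toList.map (fun c => String.ofList [c]) := by
      intro s hs
      exact List.count_pos_iff.mp (by rw [hone s hs]; omega)
    have hsingle : ∀ s ∈ S, ∃ c, s = String.ofList [c] := by
      intro s hs
      obtain ⟨c, _, rfl⟩ := List.mem_map.mp (he s hs)
      exact ⟨c, rfl⟩
    refine ⟨hsub.mpr he, (hkey hsingle).mpr ?_⟩
    have hsum := sum_counts S hS d.toList
    rw [← hsum]
    rw [List.map_congr_left (fun s hs => by rw [hone s hs])]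
    simp only [Nat.cast_one]
    rw [PySem.List.sum_map_const_int]
    ring

-- the two loops agree for any duplicate-free spell set
lemma loop_eq (S : PySem.Set String) (hS : S.Nodup) (dic : List String) :
    solutionLoopA S dic = solutionLoopB S dic := by
  induction dic with
  | nil => rfl
  | cons d rest ih =>
    simp only [solutionLoopA, solutionLoopB]
    have hce := cond_eq S hS d
    by_cases hB : (S.all (fun s =>
        ((pvCharStrs d).foldl (fun m ch => m.insert ch (m.getD ch 0 + 1))
          PySem.Dict.empty).getD s 0 == (1 : Int)) = true)
    · obtain ⟨h1, h2⟩ := hce.mpr hB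
      rw [if_pos h1, if_pos h2, if_pos hB]
    · rw [if_neg hB]
      by_cases h1 : (PySem.Set.equal (PySem.Set.inter S (PySem.Set.ofList (pvCharStrs d))) S = true)
      · rw [if_pos h1]
        have h2 : ¬ (PySem.Str.len (S.foldl (fun s i => PySem.Str.replace s i "") d)
            - PySem.Str.len d = -(PySem.Set.len S)) := by
          intro h2
          exact hB (hce.mp ⟨h1, h2⟩)
        rw [if_neg h2, ih]
      · rw [if_neg h1, ih]

-- ===== VERDICT (by name: the statement is the Claim_ definition above) =====
theorem solution_spec : Claim_equal_solution := by
  intro spell dic _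
  unfold Spec_solution solution solution_alt
  exact loop_eq _ (PySem.Set.nodup_ofList spell) dic
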